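-- pv_equiv track=rewrite | github.com/sudomango/Python-Algo-Tasks | Block_03/26 - matrix_arithmetic.py | last_minimal
-- ===== SOURCE A (Python) =====
-- def last_minimal(user_matrix):
--     min = user_matrix[0][0]
--     indexes = [0, 0]
--
--     for i in range(0, len(user_matrix)):
--         for j in range(0, len(user_matrix[i])):
--             if user_matrix[i][j] < min:
--                 min = user_matrix[i][j]
--                 indexes = [i, j]
--             elif user_matrix[i][j] == min:
--                 indexes = [i, j]
--
--     return {"min": min, "index_i": indexes[0], "index_j": indexes[1]}
-- ===== SOURCE B (Python) =====
-- def last_minimal(user_matrix):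
--     min_val = min(v for row in user_matrix for v in row)
--     pos = None
--     for i, row in enumerate(user_matrix):
--         for j, v in enumerate(row):
--             if v == min_val:
--                 pos = (i, j)
--     return {"min": min_val, "index_i": pos[0], "index_j": pos[1]}
-- ===== Notes on version B (the rewrite author's own statement) =====
-- stated objective: simpler
-- what changed: Single forward scan maintaining a running min with merged update logic is replaced by two passes: the built-in min over the flattened matrix, then a scan recording the last position equal to that minimum.
-- crash fix: On matrices whose first row is empty but which contain elements (e.g. [[],[3]]), A raises IndexError on user_matrix[0][0] while B returns the minimum with its last row-major position. — e.g. on last_minimal([[], [3]]): A raises IndexError, B returns [("min", 3), ("index_i", 1), ("index_j", 0)]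
import Mathlib
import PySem

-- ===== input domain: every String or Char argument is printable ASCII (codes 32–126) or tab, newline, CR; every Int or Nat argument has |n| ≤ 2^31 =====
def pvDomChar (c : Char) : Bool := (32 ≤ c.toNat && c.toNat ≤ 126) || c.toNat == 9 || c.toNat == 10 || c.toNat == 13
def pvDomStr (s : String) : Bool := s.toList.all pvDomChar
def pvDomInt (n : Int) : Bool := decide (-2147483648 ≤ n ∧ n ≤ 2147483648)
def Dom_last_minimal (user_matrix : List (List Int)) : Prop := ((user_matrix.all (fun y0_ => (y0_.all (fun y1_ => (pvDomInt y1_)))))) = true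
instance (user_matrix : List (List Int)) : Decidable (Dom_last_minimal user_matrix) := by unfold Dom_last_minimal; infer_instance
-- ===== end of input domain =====

-- B replaces A's single scan (running min + merged index updates) by two passes: built-in min of the
-- flattened matrix, then a scan recording the last row-major position equal to it (objective: simpler).


-- ===== PORT A =====
def last_minimal (user_matrix : List (List Int)) : List (String × Int) :=
  let mn0 : Int := PySem.List.pyGetD (PySem.List.pyGetD user_matrix 0 ([] : List Int)) 0 0
  let st :=
    (PySem.List.pyRange 0 (user_matrix.length : Int) 1).foldl
      (fun (s : Int × Int × Int) i =>
        let row := PySem.List.pyGetD user_matrix i ([] : List Int)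
        (PySem.List.pyRange 0 (row.length : Int) 1).foldl
          (fun (s : Int × Int × Int) j =>
            let v := PySem.List.pyGetD row j (0 : Int)
            if v < s.1 then (v, i, j)
            else if v = s.1 then (s.1, i, j)
            else s) s)
      (mn0, 0, 0)
  [("min", st.1), ("index_i", st.2.1), ("index_j", st.2.2)]

-- ===== PORT B =====
def last_minimal_alt (user_matrix : List (List Int)) : List (String × Int) :=
  let min_val : Int := (PySem.List.min? (user_matrix.flatMap id) id).getD 0
  let pos :=
    (PySem.List.enumerate user_matrix).foldl
      (fun (pos : Option (Int × Int)) p =>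
        (PySem.List.enumerate p.2).foldl
          (fun pos q => if q.2 = min_val then some (p.1, q.1) else pos) pos)
      none
  let pr := pos.getD (0, 0)
  [("min", min_val), ("index_i", pr.1), ("index_j", pr.2)]

-- ===== PRECONDITION & SPEC =====
-- Pre_ excludes exactly the inputs where A raises IndexError: an empty matrix or an empty first row.
def Pre_last_minimal (user_matrix : List (List Int)) : Prop :=
  user_matrix ≠ [] ∧ user_matrix.headD [] ≠ []
instance (user_matrix : List (List Int)) : Decidable (Pre_last_minimal user_matrix) := by
  unfold Pre_last_minimal; infer_instance
def pvWitness_last_minimal : List (List Int) := [[3, 1], [2, 1]]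

-- On matrices whose first row is empty but which contain elements, A raises IndexError on
-- user_matrix[0][0] while B returns the minimum with its last row-major position.
def Raises_last_minimal (user_matrix : List (List Int)) : Prop :=
  user_matrix.headD [] = [] ∧ user_matrix.flatMap id ≠ []
instance (user_matrix : List (List Int)) : Decidable (Raises_last_minimal user_matrix) := by
  unfold Raises_last_minimal; infer_instance
def pvRaiseWitness_last_minimal : List (List Int) := [[], [3]]
def pvRaiseWitnessOut_last_minimal : List (String × Int) := [("min", 3), ("index_i", 1), ("index_j", 0)]

def Spec_last_minimal (user_matrix : List (List Int)) (out : List (String × Int)) : Prop := out = last_minimal_alt user_matrix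
instance (user_matrix : List (List Int)) (out : List (String × Int)) : Decidable (Spec_last_minimal user_matrix out) := by unfold Spec_last_minimal; infer_instance

-- ===== CLAIM (what is proved, stated in full; the proofs are below) =====
def Claim_equal_last_minimal : Prop := ∀ (user_matrix : List (List Int)), Dom_last_minimal user_matrix → Pre_last_minimal user_matrix → Spec_last_minimal user_matrix (last_minimal user_matrix)
def Claim_raises_last_minimal : Prop := (∀ (user_matrix : List (List Int)), Dom_last_minimal user_matrix → Raises_last_minimal user_matrix → ¬ Pre_last_minimal user_matrix) ∧ (Dom_last_minimal (pvRaiseWitness_last_minimal) ∧ Raises_last_minimal (pvRaiseWitness_last_minimal) ∧ last_minimal_alt (pvRaiseWitness_last_minimal) = pvRaiseWitnessOut_last_minimal)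

-- ===== LEMMAS AND PROOFS =====

-- proof-only helpers: the row-major list of (i, j, value) triples and the abstract folds
def pvTrip (m : List (List Int)) : List (Int × Int × Int) :=
  (PySem.List.enumerate m).flatMap
    (fun p => (PySem.List.enumerate p.2).map (fun q => (p.1, q.1, q.2)))

def pvStepA (s : Int × Int × Int) (t : Int × Int × Int) : Int × Int × Int :=
  if t.2.2 < s.1 then (t.2.2, t.1, t.2.1) else if t.2.2 = s.1 then (s.1, t.1, t.2.1) else s

def pvMfold (L : List (Int × Int × Int)) (a : Int) : Int := L.foldl (fun a t => min a t.2.2) a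

def pvLastEq (M : Int) (L : List (Int × Int × Int)) (p : Int × Int) : Int × Int :=
  L.foldl (fun q t => if t.2.2 = M then (t.1, t.2.1) else q) p

def pvOptF (M : Int) (L : List (Int × Int × Int)) (q0 : Option (Int × Int)) : Option (Int × Int) :=
  L.foldl (fun q t => if t.2.2 = M then some (t.1, t.2.1) else q) q0

theorem pvMfold_le (L : List (Int × Int × Int)) : ∀ a : Int, pvMfold L a ≤ a := by
  induction L with
  | nil => intro a; simp [pvMfold]
  | cons t L ih =>
    intro a
    have h := ih (min a t.2.2)
    simp only [pvMfold, List.foldl_cons] at h ⊢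
    exact le_trans h (min_le_left _ _)

theorem pvMfold_attained (L : List (Int × Int × Int)) :
    ∀ a : Int, pvMfold L a = a ∨ ∃ t ∈ L, t.2.2 = pvMfold L a := by
  induction L with
  | nil => intro a; left; simp [pvMfold]
  | cons t L ih =>
    intro a
    simp only [pvMfold, List.foldl_cons]
    rcases ih (min a t.2.2) with h | ⟨u, hu, hv⟩
    · simp only [pvMfold] at h
      rw [h]
      rcases le_total a t.2.2 with hle | hle
      · left; exact min_eq_left hle
      · right; exact ⟨t, List.mem_cons_self, (min_eq_right hle).symm⟩
    · right; exact ⟨u, List.mem_cons_of_mem _ hu, hv⟩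

theorem pvLastEq_irrel (M : Int) (L : List (Int × Int × Int))
    (h : ∃ t ∈ L, t.2.2 = M) (p q : Int × Int) : pvLastEq M L p = pvLastEq M L q := by
  induction L generalizing p q with
  | nil => simp at h
  | cons t L ih =>
    simp only [pvLastEq, List.foldl_cons]
    by_cases ht : t.2.2 = M
    · simp [ht]
    · rcases h with ⟨u, hu, hv⟩
      rcases List.mem_cons.mp hu with rfl | hu'
      · exact absurd hv ht
      · simp only [if_neg ht]
        exact ih ⟨u, hu', hv⟩ p q

theorem pvA_char (L : List (Int × Int × Int)) :
    ∀ (mn : Int) (p : Int × Int),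
      L.foldl pvStepA (mn, p) = (pvMfold L mn, pvLastEq (pvMfold L mn) L p) := by
  induction L with
  | nil => intro mn p; simp [pvMfold, pvLastEq]
  | cons t L ih =>
    intro mn p
    have hM : pvMfold (t :: L) mn = pvMfold L (min mn t.2.2) := by simp [pvMfold]
    rw [List.foldl_cons, hM]
    by_cases hle : t.2.2 ≤ mn
    · have hstep : pvStepA (mn, p) t = (t.2.2, t.1, t.2.1) := by
        unfold pvStepA
        rcases lt_or_eq_of_le hle with h | h
        · rw [if_pos h]
        · rw [if_neg (by omega), if_pos h, h]
      have hmin : min mn t.2.2 = t.2.2 := min_eq_right hle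
      rw [hstep, ih t.2.2 (t.1, t.2.1), hmin, Prod.mk.injEq]
      refine ⟨rfl, ?_⟩
      have hsplit : pvLastEq (pvMfold L t.2.2) (t :: L) p
          = pvLastEq (pvMfold L t.2.2) L
              (if t.2.2 = pvMfold L t.2.2 then (t.1, t.2.1) else p) := by
        simp only [pvLastEq, List.foldl_cons]
      rw [hsplit]
      by_cases heq : t.2.2 = pvMfold L t.2.2
      · rw [if_pos heq]
      · rw [if_neg heq]
        have hex : ∃ u ∈ L, u.2.2 = pvMfold L t.2.2 := by
          rcases pvMfold_attained L t.2.2 with h | h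
          · exact absurd h.symm heq
          · exact h
        exact pvLastEq_irrel _ L hex _ _
    · have hstep : pvStepA (mn, p) t = (mn, p) := by
        unfold pvStepA
        rw [if_neg (by omega), if_neg (by omega)]
      have hmin : min mn t.2.2 = mn := min_eq_left (by omega)
      rw [hstep, ih mn p, hmin, Prod.mk.injEq]
      refine ⟨rfl, ?_⟩
      have hne : t.2.2 ≠ pvMfold L mn := by
        have := pvMfold_le L mn; omega
      simp [pvLastEq, hne]

theorem pvOptF_some (M : Int) (L : List (Int × Int × Int)) :
    ∀ p : Int × Int, pvOptF M L (some p) = some (pvLastEq M L p) := by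
  induction L with
  | nil => intro p; simp [pvOptF, pvLastEq]
  | cons t L ih =>
    intro p
    simp only [pvOptF, pvLastEq, List.foldl_cons]
    by_cases ht : t.2.2 = M
    · simp only [if_pos ht]; exact ih (t.1, t.2.1)
    · simp only [if_neg ht]; exact ih p

theorem pvOptF_mem (M : Int) (L : List (Int × Int × Int))
    (h : ∃ t ∈ L, t.2.2 = M) (p : Int × Int) :
    pvOptF M L none = some (pvLastEq M L p) := by
  induction L with
  | nil => simp at h
  | cons t L ih =>
    simp only [pvOptF, pvLastEq, List.foldl_cons]
    by_cases ht : t.2.2 = M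
    · simp only [if_pos ht]
      exact pvOptF_some M L (t.1, t.2.1)
    · rcases h with ⟨u, hu, hv⟩
      rcases List.mem_cons.mp hu with rfl | hu'
      · exact absurd hv ht
      · simp only [if_neg ht]
        exact ih ⟨u, hu', hv⟩

theorem pvFoldl_flatMap {α β σ : Type} (g : α → List β) (f : σ → β → σ) :
    ∀ (l : List α) (init : σ),
      (l.flatMap g).foldl f init = l.foldl (fun s a => (g a).foldl f s) init := by
  intro l
  induction l with
  | nil => intro init; simp
  | cons x l ih => intro init; simp [List.foldl_append, ih]

theorem pvFoldl_range_idx {α σ : Type} (f : σ → Int → α → σ) (d : α) :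
    ∀ (xs pre : List α) (init : σ),
      (PySem.List.pyRange (pre.length : Int) ((pre.length : Int) + (xs.length : Int)) 1).foldl
        (fun s i => f s i (PySem.List.pyGetD (pre ++ xs) i d)) init
      = (PySem.List.enumerate xs (pre.length : Int)).foldl (fun s q => f s q.1 q.2) init := by
  intro xs
  induction xs with
  | nil =>
    intro pre init
    rw [PySem.List.pyRange_one_eq_nil (by simp)]
    simp [PySem.List.enumerate]
  | cons x xs ih =>
    intro pre init
    rw [PySem.List.pyRange_one_cons (by push_cast [List.length_cons]; omega), List.foldl_cons]
    have hget : PySem.List.pyGetD (pre ++ x :: xs) (pre.length : Int) d = x := by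
      rw [PySem.List.pyGetD_natCast]
      simp [List.getD_eq_getElem?_getD]
    rw [hget, PySem.List.enumerate_cons, List.foldl_cons]
    have h3 : (pre.length : Int) + ((x :: xs).length : Int)
        = (((pre ++ [x]).length : Nat) : Int) + (xs.length : Int) := by
      push_cast [List.length_append, List.length_cons, List.length_nil]; omega
    have h2 : (pre.length : Int) + 1 = (((pre ++ [x]).length : Nat) : Int) := by
      push_cast [List.length_append, List.length_cons, List.length_nil]; omega
    have h1 : pre ++ x :: xs = (pre ++ [x]) ++ xs := by simp
    rw [h3, h2, h1]
    exact ih (pre ++ [x]) (f init (pre.length : Int) x)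

theorem pvFoldl_range_idx0 {α σ : Type} (f : σ → Int → α → σ) (d : α)
    (xs : List α) (init : σ) :
    (PySem.List.pyRange 0 (xs.length : Int) 1).foldl
        (fun s i => f s i (PySem.List.pyGetD xs i d)) init
      = (PySem.List.enumerate xs 0).foldl (fun s q => f s q.1 q.2) init := by
  have h := pvFoldl_range_idx f d xs [] init
  simp at h
  exact h

theorem pvTrip_vals (m : List (List Int)) :
    ∀ s : Int,
      (((PySem.List.enumerate m s).flatMap
        (fun p => (PySem.List.enumerate p.2).map (fun q => (p.1, q.1, q.2)))).map
          (fun t : Int × Int × Int => t.2.2)) = m.flatMap id := by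
  induction m with
  | nil => intro s; simp [PySem.List.enumerate]
  | cons r m ih =>
    intro s
    rw [PySem.List.enumerate_cons]
    simp only [List.flatMap_cons, List.map_append, List.map_map]
    rw [ih (s + 1)]
    congr 1
    have : ((fun t : Int × Int × Int => t.2.2) ∘ fun q : Int × Int => (s, q.1, q.2))
        = (fun q : Int × Int => q.2) := by funext q; rfl
    rw [this]
    exact PySem.List.map_snd_enumerate r 0

theorem pvMin?_cons (x : Int) (xs : List Int) :
    PySem.List.min? (x :: xs) (id : Int → Int) = some (xs.foldl min x) := by
  induction xs generalizing x with
  | nil => rfl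
  | cons y ys ih =>
    have h1 : PySem.List.min? (x :: y :: ys) (id : Int → Int)
        = PySem.List.min? (min x y :: ys) (id : Int → Int) := by
      simp only [PySem.List.min?, List.foldl_cons]
      congr 1
      show (if id y < id x then some y else some x) = some (min x y)
      rcases le_total x y with h | h
      · rw [if_neg (by simp [id]; omega), min_eq_left h]
      · rcases eq_or_lt_of_le h with rfl | h'
        · rw [if_neg (by simp [id]), min_self]
        · rw [if_pos (by simp [id]; omega), min_eq_right h]
    rw [h1, ih (min x y)]
    rfl

-- the two ports both compute (min, last position of min) over the triple list
theorem pvPorts_eq (v0 : Int) (r0 : List Int) (ms : List (List Int)) :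
    last_minimal ((v0 :: r0) :: ms) = last_minimal_alt ((v0 :: r0) :: ms) := by
  set m : List (List Int) := (v0 :: r0) :: ms with hm
  -- A side --------------------------------------------------------------
  have hmn0 : PySem.List.pyGetD (PySem.List.pyGetD m 0 ([] : List Int)) 0 (0 : Int) = v0 := by
    rw [hm]
    rw [PySem.List.pyGetD_zero_cons, PySem.List.pyGetD_zero_cons]
  have houter :
      (PySem.List.pyRange 0 (m.length : Int) 1).foldl
        (fun (s : Int × Int × Int) i =>
          let row := PySem.List.pyGetD m i ([] : List Int)
          (PySem.List.pyRange 0 (row.length : Int) 1).foldl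
            (fun (s : Int × Int × Int) j =>
              let v := PySem.List.pyGetD row j (0 : Int)
              if v < s.1 then (v, i, j)
              else if v = s.1 then (s.1, i, j)
              else s) s)
        (v0, 0, 0)
      = (pvTrip m).foldl pvStepA (v0, (0, 0)) := by
    rw [pvFoldl_range_idx0
      (fun (s : Int × Int × Int) (i : Int) (row : List Int) =>
        (PySem.List.pyRange 0 (row.length : Int) 1).foldl
          (fun (s : Int × Int × Int) j =>
            let v := PySem.List.pyGetD row j (0 : Int)
            if v < s.1 then (v, i, j)
            else if v = s.1 then (s.1, i, j)
            else s) s) ([] : List Int) m (v0, 0, 0)]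
    have hinner : (fun (s : Int × Int × Int) (q : Int × List Int) =>
        (PySem.List.pyRange 0 (q.2.length : Int) 1).foldl
          (fun (s : Int × Int × Int) j =>
            let v := PySem.List.pyGetD q.2 j (0 : Int)
            if v < s.1 then (v, q.1, j)
            else if v = s.1 then (s.1, q.1, j)
            else s) s)
        = (fun (s : Int × Int × Int) (q : Int × List Int) =>
            (PySem.List.enumerate q.2 0).foldl
              (fun (s : Int × Int × Int) (w : Int × Int) => pvStepA s (q.1, w.1, w.2)) s) := by
      funext s q
      rw [pvFoldl_range_idx0
        (fun (s : Int × Int × Int) (j : Int) (v : Int) =>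
          if v < s.1 then (v, q.1, j)
          else if v = s.1 then (s.1, q.1, j)
          else s) (0 : Int) q.2 s]
      rfl
    rw [hinner, pvTrip, pvFoldl_flatMap]
    simp only [List.foldl_map]
  -- B side --------------------------------------------------------------
  have hflat : m.flatMap id = v0 :: (r0 ++ ms.flatMap id) := by
    rw [hm]; simp
  have hminval : (PySem.List.min? (m.flatMap id) (id : Int → Int)).getD 0
      = pvMfold (pvTrip m) v0 := by
    rw [hflat, pvMin?_cons]
    have : pvMfold (pvTrip m) v0
        = ((pvTrip m).map (fun t : Int × Int × Int => t.2.2)).foldl min v0 := by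
      rw [pvMfold, List.foldl_map]
    rw [this, pvTrip, pvTrip_vals m 0, hflat]
    simp
  set M : Int := pvMfold (pvTrip m) v0 with hMdef
  have hex : ∃ t ∈ pvTrip m, t.2.2 = M := by
    rcases pvMfold_attained (pvTrip m) v0 with h | h
    · have hv0 : v0 ∈ (pvTrip m).map (fun t : Int × Int × Int => t.2.2) := by
        rw [pvTrip, pvTrip_vals m 0, hflat]; exact List.mem_cons_self
      rcases List.mem_map.mp hv0 with ⟨t, ht, hv⟩
      exact ⟨t, ht, by rw [hv, ← h]⟩
    · exact h
  have hpos :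
      (PySem.List.enumerate m).foldl
        (fun (pos : Option (Int × Int)) p =>
          (PySem.List.enumerate p.2).foldl
            (fun pos q => if q.2 = M then some (p.1, q.1) else pos) pos)
        none
      = pvOptF M (pvTrip m) none := by
    rw [pvOptF, pvTrip, pvFoldl_flatMap]
    simp only [List.foldl_map]
  -- combine -------------------------------------------------------------
  show last_minimal m = last_minimal_alt m
  rw [last_minimal, last_minimal_alt]
  simp only [hmn0, hminval, houter, hpos]
  rw [pvA_char (pvTrip m) v0 ((0 : Int), (0 : Int))]
  rw [pvOptF_mem M (pvTrip m) hex ((0 : Int), (0 : Int))]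
  rfl

-- ===== VERDICT (by name: the statement is the Claim_ definition above) =====
theorem last_minimal_spec : Claim_equal_last_minimal := by
  intro m _ hpre
  rcases hpre with ⟨hne, hrow⟩
  match m with
  | [] => exact absurd rfl hne
  | [] :: ms => exact absurd rfl hrow
  | (v0 :: r0) :: ms =>
    show last_minimal _ = last_minimal_alt _
    exact pvPorts_eq v0 r0 ms

theorem last_minimal_raises : Claim_raises_last_minimal := by
  unfold Claim_raises_last_minimal
  constructor
  · intro m _ hr hpre
    exact hpre.2 hr.1
  · exact ⟨by decide, by decide, by decide⟩

-- witness self-check: the crash-fix witness value is exactly what B's port returns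
theorem pvRaiseWitness_ok :
    last_minimal_alt pvRaiseWitness_last_minimal = pvRaiseWitnessOut_last_minimal :=
  last_minimal_raises.2.2.2
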